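-- pv_equiv track=rewrite | github.com/doowoo625-cmyk/lotto-pro | app/main.py | compute_range_freq
-- ===== SOURCE A (Python) =====
-- from typing import List, Dict, Tuple, Optional
--
-- def range_buckets() -> List[Tuple[str, range]]:
--     return [
--         ("1-10", range(1, 11)),
--         ("11-20", range(11, 21)),
--         ("21-30", range(21, 31)),
--         ("31-40", range(31, 41)),
--         ("41-45", range(41, 46)),
--     ]
--
-- def compute_range_freq(items: List[dict]) -> dict:
--     per = {k: {str(n): 0 for n in bucket} for k, bucket in range_buckets()}
--     for it in items:
--         for n in it["numbers"]:
--             for k, bucket in range_buckets():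
--                 if n in bucket:
--                     per[k][str(n)] += 1
--                     break
--     return {"per": per}
-- ===== SOURCE B (Python) =====
-- def range_buckets():
--     return [
--         ("1-10", range(1, 11)),
--         ("11-20", range(11, 21)),
--         ("21-30", range(21, 31)),
--         ("31-40", range(31, 41)),
--         ("41-45", range(41, 46)),
--     ]
--
-- def compute_range_freq(items):
--     # stage 1: count every drawn number once
--     cnt = {}
--     for it in items:
--         for n in it["numbers"]:
--             cnt[n] = cnt.get(n, 0) + 1
--     # stage 2: build the whole table directly from the counts
--     per = {k: {str(n): cnt.get(n, 0) for n in bucket} for k, bucket in range_buckets()}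
--     return {"per": per}
-- ===== Notes on version B (the rewrite author's own statement) =====
-- stated objective: alternative
-- what changed: B is a two-stage pipeline: it first builds a Counter of all drawn numbers in one pass, then constructs the whole per-range table directly from the counts, instead of A's per-number five-bucket dispatch with in-place increments into a pre-zeroed table.
import Mathlib
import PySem

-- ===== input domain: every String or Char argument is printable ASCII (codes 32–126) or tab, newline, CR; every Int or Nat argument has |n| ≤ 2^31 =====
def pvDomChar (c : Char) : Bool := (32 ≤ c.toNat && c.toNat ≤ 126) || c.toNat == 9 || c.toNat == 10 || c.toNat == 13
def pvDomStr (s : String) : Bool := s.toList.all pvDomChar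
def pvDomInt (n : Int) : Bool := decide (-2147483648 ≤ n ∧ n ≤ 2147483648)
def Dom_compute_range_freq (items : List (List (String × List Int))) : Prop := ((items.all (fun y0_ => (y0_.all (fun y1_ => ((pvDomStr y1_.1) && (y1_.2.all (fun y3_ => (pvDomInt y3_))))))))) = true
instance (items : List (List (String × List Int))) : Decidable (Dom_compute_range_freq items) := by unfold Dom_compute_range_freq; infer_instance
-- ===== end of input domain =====

-- B replaces A's per-number bucket dispatch and in-place increments by two stages: one counting
-- pass over all numbers, then a direct construction of the whole table from the counts
-- (objective: alternative — a different decomposition, similar cost).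


-- ===== PORT A =====
-- range_buckets(): the five (label, range) pairs; range(a,b) ported as pyRange a b 1
def rangeBuckets : List (String × List Int) :=
  [("1-10", PySem.List.pyRange 1 11 1), ("11-20", PySem.List.pyRange 11 21 1),
   ("21-30", PySem.List.pyRange 21 31 1), ("31-40", PySem.List.pyRange 31 41 1),
   ("41-45", PySem.List.pyRange 41 46 1)]

-- {k: {str(n): 0 for n in bucket} for k, bucket in range_buckets()}
def perInit : PySem.Dict String (PySem.Dict String Int) :=
  rangeBuckets.foldl
    (fun d kb => d.insert kb.1 (kb.2.foldl (fun inner n => inner.insert (PySem.Int.toStr n) 0) PySem.Dict.empty))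
    PySem.Dict.empty

-- per[k][str(n)] += 1 (keys always present when used below)
def bump (per : PySem.Dict String (PySem.Dict String Int)) (k : String) (n : Int) :
    PySem.Dict String (PySem.Dict String Int) :=
  per.modify k PySem.Dict.empty (fun inner => inner.modify (PySem.Int.toStr n) 0 (· + 1))

-- A's inner 'for k, bucket in range_buckets(): if n in bucket: …; break'
def aScan (per : PySem.Dict String (PySem.Dict String Int)) (n : Int) :
    List (String × List Int) → PySem.Dict String (PySem.Dict String Int)
  | [] => per
  | (k, b) :: rest => if n ∈ b then bump per k n else aScan per n rest

def compute_range_freq (items : List (List (String × List Int))) : List (String × List (String × List (String × Int))) :=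
  let per := items.foldl
    (fun per it =>
      ((PySem.Dict.mk it).getD "numbers" []).foldl (fun per n => aScan per n rangeBuckets) per)
    perInit
  [("per", per.items.map (fun kv => (kv.1, kv.2.items)))]

-- ===== PORT B =====
-- stage 1: cnt[n] = cnt.get(n, 0) + 1 over every number of every item
-- stage 2: per = {k: {str(n): cnt.get(n, 0) for n in bucket} for k, bucket in range_buckets()}
def compute_range_freq_alt (items : List (List (String × List Int))) : List (String × List (String × List (String × Int))) :=
  let cnt : PySem.Dict Int Int := items.foldl
    (fun c it => ((PySem.Dict.mk it).getD "numbers" []).foldl (fun c n => c.insert n (c.getD n 0 + 1)) c)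
    PySem.Dict.empty
  let per := rangeBuckets.foldl
    (fun d kb => d.insert kb.1 (kb.2.foldl (fun inner m => inner.insert (PySem.Int.toStr m) (cnt.getD m 0)) PySem.Dict.empty))
    PySem.Dict.empty
  [("per", per.items.map (fun kv => (kv.1, kv.2.items)))]

-- ===== PRECONDITION & SPEC =====
-- Pre_ excludes exactly the inputs where the Python raises KeyError: an item dict without a "numbers" key (both A and B raise there).
def Pre_compute_range_freq (items : List (List (String × List Int))) : Prop :=
  (items.all (fun it => it.any (fun p => p.1 == "numbers"))) = true
instance (items : List (List (String × List Int))) : Decidable (Pre_compute_range_freq items) := by unfold Pre_compute_range_freq; infer_instance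
def pvWitness_compute_range_freq : (List (List (String × List Int))) := [[("numbers", [3, 41, 99])]]

def Spec_compute_range_freq (items : List (List (String × List Int))) (out : List (String × List (String × List (String × Int)))) : Prop := out = compute_range_freq_alt items
instance (items : List (List (String × List Int))) (out : List (String × List (String × List (String × Int)))) : Decidable (Spec_compute_range_freq items out) := by unfold Spec_compute_range_freq; infer_instance

-- ===== CLAIM =====
def Claim_equal_compute_range_freq : Prop := ∀ (items : List (List (String × List Int))), Dom_compute_range_freq items → Pre_compute_range_freq items → Spec_compute_range_freq items (compute_range_freq items)

-- ===== LEMMAS AND PROOFS =====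
set_option maxRecDepth 100000
set_option maxHeartbeats 1000000

-- the per-range table as a function of an arbitrary count function g
def innerF (g : Int → Int) (b : List Int) : PySem.Dict String Int :=
  b.foldl (fun inner m => inner.insert (PySem.Int.toStr m) (g m)) PySem.Dict.empty

def buildPerF (g : Int → Int) : PySem.Dict String (PySem.Dict String Int) :=
  rangeBuckets.foldl (fun d kb => d.insert kb.1 (innerF g kb.2)) PySem.Dict.empty

lemma bucket_keys_nodup : ∀ kb ∈ rangeBuckets, (kb.2.map PySem.Int.toStr).Nodup := by decide

lemma bucket_toStr_inj : ∀ kb ∈ rangeBuckets, ∀ m ∈ kb.2, ∀ n ∈ kb.2,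
    PySem.Int.toStr m = PySem.Int.toStr n → m = n := by decide

lemma bucket_disjoint : ∀ kb ∈ rangeBuckets, ∀ kb' ∈ rangeBuckets, kb.1 ≠ kb'.1 →
    ∀ x ∈ kb.2, x ∉ kb'.2 := by decide

lemma label_determines : ∀ kb ∈ rangeBuckets, ∀ kb' ∈ rangeBuckets, kb.1 = kb'.1 → kb = kb' := by
  decide

lemma labels_nodup : (rangeBuckets.map (·.1)).Nodup := by decide

lemma innerF_items (g : Int → Int) (b : List Int) (hb : (b.map PySem.Int.toStr).Nodup) :
    (innerF g b).items = b.map (fun m => (PySem.Int.toStr m, g m)) := by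
  have := PySem.Dict.items_foldl_insert_fresh b (k := PySem.Int.toStr) (v := fun m => g m)
    (d := PySem.Dict.empty) (by intro a _; simp) hb
  simpa [innerF] using this

lemma buildPerF_items (g : Int → Int) :
    (buildPerF g).items = rangeBuckets.map (fun kb => (kb.1, innerF g kb.2)) := by
  have := PySem.Dict.items_foldl_insert_fresh rangeBuckets (k := (·.1))
    (v := fun kb => innerF g kb.2) (d := PySem.Dict.empty) (by intro a _; simp) labels_nodup
  simpa [buildPerF] using this

lemma buildPerF_keys_nodup (g : Int → Int) : (buildPerF g).keys.Nodup := by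
  simpa [PySem.Dict.keys, buildPerF_items, List.map_map, Function.comp] using labels_nodup

lemma innerF_keys_nodup (g : Int → Int) (b : List Int) (hb : (b.map PySem.Int.toStr).Nodup) :
    (innerF g b).keys.Nodup := by
  simpa [PySem.Dict.keys, innerF_items g b hb, List.map_map, Function.comp] using hb

lemma buildPerF_congr {g g' : Int → Int}
    (h : ∀ kb ∈ rangeBuckets, ∀ m ∈ kb.2, g m = g' m) : buildPerF g = buildPerF g' := by
  apply PySem.Dict.ext
  rw [buildPerF_items, buildPerF_items]
  apply List.map_congr_left
  intro kb hkb
  have hinner : innerF g kb.2 = innerF g' kb.2 := by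
    apply PySem.Dict.ext
    rw [innerF_items g _ (bucket_keys_nodup kb hkb), innerF_items g' _ (bucket_keys_nodup kb hkb)]
    exact List.map_congr_left (fun m hm => by rw [h kb hkb m hm])
  rw [hinner]

-- bumping label k at a member n of its bucket = building with the count of n raised by one
lemma bump_buildPerF (g : Int → Int) (n : Int) (k : String) (b : List Int)
    (hmem : (k, b) ∈ rangeBuckets) (hn : n ∈ b) :
    bump (buildPerF g) k n = buildPerF (fun m => if m = n then g m + 1 else g m) := by
  have hnd := buildPerF_keys_nodup g
  have hbk := bucket_keys_nodup (k, b) hmem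
  have hinmem : ((k : String), innerF g b) ∈ (buildPerF g).items := by
    rw [buildPerF_items]; exact List.mem_map.mpr ⟨(k, b), hmem, rfl⟩
  have hgetD : (buildPerF g).getD k PySem.Dict.empty = innerF g b :=
    PySem.Dict.getD_of_mem_items _ hinmem hnd _
  have hcontains : (buildPerF g).contains k = true := by
    rw [PySem.Dict.contains_iff_mem_keys]
    exact PySem.Dict.mem_keys_of_mem_items _ hinmem
  -- the new inner dict
  have hingetD : (innerF g b).getD (PySem.Int.toStr n) 0 = g n :=
    PySem.Dict.getD_of_mem_items _
      (by rw [innerF_items g b hbk]; exact List.mem_map.mpr ⟨n, hn, rfl⟩)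
      (innerF_keys_nodup g b hbk) _
  have hincont : (innerF g b).contains (PySem.Int.toStr n) = true := by
    rw [PySem.Dict.contains_iff_mem_keys]
    exact PySem.Dict.mem_keys_of_mem_items _
      (by rw [innerF_items g b hbk]; exact List.mem_map.mpr ⟨n, hn, rfl⟩)
  have hinner : (innerF g b).modify (PySem.Int.toStr n) 0 (· + 1)
      = innerF (fun m => if m = n then g m + 1 else g m) b := by
    apply PySem.Dict.ext
    simp only [PySem.Dict.modify]
    rw [PySem.Dict.items_insert_of_contains _ _ hincont, hingetD,
        innerF_items g b hbk, innerF_items _ b hbk, List.map_map]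
    apply List.map_congr_left
    intro m hm
    by_cases hmn : PySem.Int.toStr m = PySem.Int.toStr n
    · have : m = n := bucket_toStr_inj (k, b) hmem m hm n hn hmn
      subst this
      simp
    · have hne : m ≠ n := fun h => hmn (by rw [h])
      simp [Function.comp, hmn, hne]
  apply PySem.Dict.ext
  have hinner2 : (innerF g b).insert (PySem.Int.toStr n) (g n + 1)
      = innerF (fun m => if m = n then g m + 1 else g m) b := by
    have h' := hinner
    simp only [PySem.Dict.modify, hingetD] at h'
    exact h'
  simp only [bump, PySem.Dict.modify]
  rw [hgetD, hingetD, hinner2, PySem.Dict.items_insert_of_contains _ _ hcontains,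
      buildPerF_items, buildPerF_items, List.map_map]
  apply List.map_congr_left
  intro kb hkb
  by_cases hk : kb.1 = k
  · -- same label: buckets with the same label are equal (labels are nodup)
    have hkbeq : kb = (k, b) := label_determines kb hkb (k, b) hmem hk
    subst hkbeq
    simp [Function.comp]
  · -- other labels: their buckets do not contain n
    have hnot : n ∉ kb.2 := by
      intro hnmem
      exact bucket_disjoint kb hkb (k, b) hmem hk n hnmem hn
    have : innerF g kb.2 = innerF (fun m => if m = n then g m + 1 else g m) kb.2 := by
      apply PySem.Dict.ext
      rw [innerF_items g _ (bucket_keys_nodup kb hkb), innerF_items _ _ (bucket_keys_nodup kb hkb)]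
      apply List.map_congr_left
      intro m hm
      have : m ≠ n := fun h => hnot (h ▸ hm)
      simp [this]
    have hkne : (kb.1 == k) = false := by simp [hk]
    simp [Function.comp, hkne, this]

-- A's five-bucket scan written as a chain of range tests
lemma ascan_eq (per : PySem.Dict String (PySem.Dict String Int)) (n : Int) :
    aScan per n rangeBuckets =
    (if 1 ≤ n ∧ n < 11 then bump per "1-10" n else
     if 11 ≤ n ∧ n < 21 then bump per "11-20" n else
     if 21 ≤ n ∧ n < 31 then bump per "21-30" n else
     if 31 ≤ n ∧ n < 41 then bump per "31-40" n else
     if 41 ≤ n ∧ n < 46 then bump per "41-45" n else per) := by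
  simp only [rangeBuckets, aScan, PySem.List.mem_pyRange_one]

-- one step of A's loop on an abstract table
lemma stepA_buildPerF (g : Int → Int) (n : Int) :
    aScan (buildPerF g) n rangeBuckets = buildPerF (fun m => if m = n then g m + 1 else g m) := by
  rw [ascan_eq]
  by_cases h1 : 1 ≤ n ∧ n < 11
  · rw [if_pos h1]
    exact bump_buildPerF g n "1-10" (PySem.List.pyRange 1 11 1) (by decide) (PySem.List.mem_pyRange_one.mpr (by omega))
  rw [if_neg h1]
  by_cases h2 : 11 ≤ n ∧ n < 21
  · rw [if_pos h2]
    exact bump_buildPerF g n "11-20" (PySem.List.pyRange 11 21 1) (by decide) (PySem.List.mem_pyRange_one.mpr (by omega))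
  rw [if_neg h2]
  by_cases h3 : 21 ≤ n ∧ n < 31
  · rw [if_pos h3]
    exact bump_buildPerF g n "21-30" (PySem.List.pyRange 21 31 1) (by decide) (PySem.List.mem_pyRange_one.mpr (by omega))
  rw [if_neg h3]
  by_cases h4 : 31 ≤ n ∧ n < 41
  · rw [if_pos h4]
    exact bump_buildPerF g n "31-40" (PySem.List.pyRange 31 41 1) (by decide) (PySem.List.mem_pyRange_one.mpr (by omega))
  rw [if_neg h4]
  by_cases h5 : 41 ≤ n ∧ n < 46
  · rw [if_pos h5]
    exact bump_buildPerF g n "41-45" (PySem.List.pyRange 41 46 1) (by decide) (PySem.List.mem_pyRange_one.mpr (by omega))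
  rw [if_neg h5]
  apply buildPerF_congr
  intro kb hkb m hm
  have hb : 1 ≤ m ∧ m ≤ 45 := by
    fin_cases hkb <;> (rw [PySem.List.mem_pyRange_one] at hm; omega)
  have : m ≠ n := by omega
  simp [this]

-- A's whole loop over a flat list of numbers
lemma foldA_buildPerF (ns : List Int) : ∀ g : Int → Int,
    ns.foldl (fun per n => aScan per n rangeBuckets) (buildPerF g)
      = buildPerF (fun m => g m + (ns.count m : Int)) := by
  induction ns with
  | nil => intro g; simp
  | cons n ns ih =>
    intro g
    rw [List.foldl_cons, stepA_buildPerF, ih]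
    apply congrArg
    funext m
    by_cases h : m = n
    · subst h; simp; ring
    · have h' : ¬ n = m := fun hh => h hh.symm
      simp [h, h']

lemma perInit_eq : perInit = buildPerF (fun _ => 0) := rfl

theorem compute_range_freq_spec : Claim_equal_compute_range_freq := by
  intro items _ _
  unfold Spec_compute_range_freq compute_range_freq compute_range_freq_alt
  dsimp only
  rw [← List.foldl_flatMap (f := fun it => (PySem.Dict.mk it).getD "numbers" []),
      ← List.foldl_flatMap (f := fun it => (PySem.Dict.mk it).getD "numbers" [])]
  set ns := items.flatMap (fun it => (PySem.Dict.mk it).getD "numbers" []) with hns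
  rw [perInit_eq, foldA_buildPerF ns (fun _ => 0)]
  rw [PySem.Dict.foldl_insert_getD_add_one_eq_counter ns]
  have hB : (rangeBuckets.foldl
      (fun d kb => d.insert kb.1 (kb.2.foldl
        (fun inner m => inner.insert (PySem.Int.toStr m) ((PySem.Dict.counter ns).getD m 0)) PySem.Dict.empty))
      PySem.Dict.empty) = buildPerF (fun m => (PySem.Dict.counter ns).getD m 0) := rfl
  rw [hB]
  have : (fun m => (0 : Int) + (ns.count m : Int)) = (fun m => (PySem.Dict.counter ns).getD m 0) := by
    funext m; rw [PySem.Dict.getD_counter]; ring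
  rw [this]

-- ===== VERDICT moved: theorem above is final =====
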